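-- pv_equiv track=rewrite | github.com/chiachinggg/codewars-practice | 6. Domino Reactions.py | domino_reaction
-- ===== SOURCE A (Python) =====
-- def domino_falling(s):
--     i=1
--     while(i<len(s)):
--         if (s[i] == "|"):
--             s[i] = "/"
--             i+=1
--         else:
--             break
--     return s
--
-- def domino_reaction(s):
--     ss = list(s)
--     if len(ss) == 0:
--         return ""
--     if ss[0] == "|":
--         ss[0]="/"
--         ss=domino_falling(ss)
--     return ''.join(str(i) for i in ss)
-- ===== SOURCE B (Python) =====
-- def domino_reaction(s):
--     n = len(s) - len(s.lstrip('|'))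
--     return '/' * n + s[n:]
-- ===== Notes on version B (the rewrite author's own statement) =====
-- stated objective: idiomatic
-- what changed: Replaces the index-by-index while-loop with in-place list mutation and a join by measuring the leading run via lstrip and returning a replicated prefix plus a slice of the tail.
import Mathlib
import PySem

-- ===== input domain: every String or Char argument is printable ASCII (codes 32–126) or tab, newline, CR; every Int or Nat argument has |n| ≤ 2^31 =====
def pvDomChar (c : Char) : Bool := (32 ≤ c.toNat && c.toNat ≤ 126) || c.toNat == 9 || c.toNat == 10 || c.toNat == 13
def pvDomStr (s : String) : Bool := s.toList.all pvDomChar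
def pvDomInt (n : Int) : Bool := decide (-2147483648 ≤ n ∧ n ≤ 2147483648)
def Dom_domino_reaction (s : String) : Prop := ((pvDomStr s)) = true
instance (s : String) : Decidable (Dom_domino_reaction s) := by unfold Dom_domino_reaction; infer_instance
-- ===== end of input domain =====

-- B replaces A's index-by-index while-loop with list mutation by measuring the
-- leading fallen run (lstrip) and concatenating a replicated prefix with the tail
-- slice (idiomatic; a timing run measured B faster by a constant factor).

-- ===== PORT A =====
-- domino_falling: while (i < len(s)): if s[i]=='|': s[i]='/'; i+=1 else break
def dominoFallingLoop (ss : List Char) (i : Nat) : List Char :=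
  if h : i < ss.length then
    if ss[i] = '|' then dominoFallingLoop (ss.set i '/') (i + 1) else ss
  else ss
termination_by ss.length - i
decreasing_by simp_all; omega

def domino_reaction (s : String) : String :=
  let ss := s.toList
  if ss.length = 0 then ""
  else if ss[0]? = some '|' then String.mk (dominoFallingLoop (ss.set 0 '/') 1)
  else String.mk ss

-- ===== PORT B =====
def domino_reaction_alt (s : String) : String :=
  -- len(s) - len(s.lstrip('|')): hand port of lstrip with chars '|' = drop the leading run of '|' (exact)
  let n := s.toList.length - (s.toList.dropWhile (· == '|')).length
  String.mk (List.replicate n '/' ++ s.toList.drop n)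

-- ===== PRECONDITION & SPEC =====
def Spec_domino_reaction (s : String) (out : String) : Prop := out = domino_reaction_alt s
instance (s : String) (out : String) : Decidable (Spec_domino_reaction s out) := by unfold Spec_domino_reaction; infer_instance

-- ===== CLAIM (what is proved, stated in full; the proofs are below) =====
def Claim_equal_domino_reaction : Prop := ∀ (s : String), Dom_domino_reaction s → Spec_domino_reaction s (domino_reaction s)

-- ===== LEMMAS AND PROOFS =====

theorem drop_length_takeWhile (p : Char → Bool) (l : List Char) :
    l.drop (l.takeWhile p).length = l.dropWhile p := by
  induction l with
  | nil => rfl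
  | cons c cs ih =>
    by_cases h : p c = true
    · simp [List.takeWhile_cons, List.dropWhile_cons, h, ih]
    · simp [List.takeWhile_cons, List.dropWhile_cons, h]

theorem length_takeWhile_add (p : Char → Bool) (l : List Char) :
    (l.takeWhile p).length + (l.dropWhile p).length = l.length := by
  induction l with
  | nil => rfl
  | cons c cs ih =>
    by_cases h : p c = true
    · simp [List.takeWhile_cons, List.dropWhile_cons, h]; omega
    · simp [List.takeWhile_cons, List.dropWhile_cons, h]

theorem dominoFallingLoop_eq (l : List Char) (i : Nat) (hi : i ≤ l.length) :
    dominoFallingLoop l i =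
      l.take i ++ List.replicate ((l.drop i).takeWhile (· == '|')).length '/'
        ++ (l.drop i).dropWhile (· == '|') := by
  induction hn : l.length - i using Nat.strong_induction_on generalizing l i with
  | _ n ih =>
  rw [dominoFallingLoop]
  by_cases h : i < l.length
  · simp only [dif_pos h]
    have hdrop : l.drop i = l[i] :: l.drop (i + 1) := List.drop_eq_getElem_cons h
    by_cases hc : l[i] = '|'
    · simp only [if_pos hc]
      have hlen : (l.set i '/').length = l.length := by simp
      have hrec := ih (l.length - (i + 1)) (by omega) (l.set i '/') (i + 1)
        (by omega) (by omega)
      rw [hrec]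
      have hdecomp : l.set i '/' = l.take i ++ '/' :: l.drop (i + 1) := by
        rw [List.set_eq_take_append_cons_drop]
        simp [h]
      have hti : (l.take i).length = i := by simp; omega
      have hset_take : (l.set i '/').take (i + 1) = l.take i ++ ['/'] := by
        rw [hdecomp, List.take_append, hti]
        simp [List.take_take]
      have hset_drop : (l.set i '/').drop (i + 1) = l.drop (i + 1) := by
        rw [List.drop_set]
        simp
      rw [hset_take, hset_drop, hdrop]
      simp [List.takeWhile_cons, List.dropWhile_cons, hc, List.replicate_succ]
    · simp only [if_neg hc]
      have hcb : (l[i] == '|') = false := by simpa using hc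
      rw [hdrop, List.takeWhile_cons, List.dropWhile_cons]
      simp only [hcb, Bool.false_eq_true, if_neg, ite_false, cond_false]
      rw [← hdrop]
      simp [List.take_append_drop]
  · simp only [dif_neg h]
    have : i = l.length := by omega
    simp [this, List.drop_length]

theorem fall_from_one (cs : List Char) :
    dominoFallingLoop ('/' :: cs) 1 =
      List.replicate ((cs.takeWhile (· == '|')).length + 1) '/'
        ++ cs.dropWhile (· == '|') := by
  rw [dominoFallingLoop_eq ('/' :: cs) 1 (by simp)]
  simp [List.replicate_succ]

theorem domino_reaction_spec : Claim_equal_domino_reaction := by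
  intro s _
  unfold Spec_domino_reaction domino_reaction domino_reaction_alt
  cases hls : s.toList with
  | nil => decide
  | cons c cs =>
    by_cases hc : c = '|'
    · subst hc
      have hset : ('|' :: cs).set 0 '/' = '/' :: cs := rfl
      have hdw : List.dropWhile (· == '|') ('|' :: cs) = List.dropWhile (· == '|') cs := by
        simp [List.dropWhile_cons]
      have hlen : (List.dropWhile (· == '|') cs).length ≤ cs.length := by
        have := length_takeWhile_add (· == '|') cs; omega
      have hn : ('|' :: cs).length - (List.dropWhile (· == '|') ('|' :: cs)).length
          = (List.takeWhile (· == '|') cs).length + 1 := by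
        have := length_takeWhile_add (· == '|') cs
        rw [hdw]; simp; omega
      have hdropn : ('|' :: cs).drop ((List.takeWhile (· == '|') cs).length + 1)
          = List.dropWhile (· == '|') cs := by
        simp only [List.drop_succ_cons]
        exact drop_length_takeWhile (· == '|') cs
      have hn' : cs.length + 1 - (List.dropWhile (· == '|') cs).length
          = (List.takeWhile (· == '|') cs).length + 1 := by simpa using hn
      simp only [List.length_cons, List.getElem?_cons_zero, hset,
        if_neg (Nat.succ_ne_zero cs.length), if_pos rfl]
      rw [fall_from_one, hdw, hn', hdropn]
      simp
    · have hcb : (c == '|') = false := by simpa using hc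
      simp only [List.length_cons, List.getElem?_cons_zero,
        if_neg (Nat.succ_ne_zero cs.length)]
      rw [if_neg (show ¬ ((some c : Option Char) = some '|') by simp [hc])]
      simp [List.dropWhile_cons, hcb]
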